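-- pv_equiv track=rewrite | github.com/danielphil/codility_training | queues.py | daniel_queue
-- ===== SOURCE A (Python) =====
-- def daniel_queue(A):
--     current_people = 0
--     min_people = 0
--
--     for c in A:
--         if c == 1:
--             if current_people == 0:
--                 min_people += 1
--             else:
--                 current_people -= 1
--         else:
--             current_people += 1
--
--     return min_people
-- ===== SOURCE B (Python) =====
-- def daniel_queue(A):
--     # Suffix recursion: need(suffix) = max(0, w(head) + need(rest)),
--     # where w(c) = +1 for a taker (c == 1) and -1 for a supplier.
--     need = 0
--     for c in reversed(A):
--         need = (1 if c == 1 else -1) + need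
--         if need < 0:
--             need = 0
--     return need
-- ===== Notes on version B (the rewrite author's own statement) =====
-- stated objective: alternative
-- what changed: Replaces A's left-to-right simulation with a pair state (floored people counter plus incrementing minimum) by a right-to-left suffix recursion maintaining a single scalar need = max(0, weight + need), whose final value is the answer.
import Mathlib
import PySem

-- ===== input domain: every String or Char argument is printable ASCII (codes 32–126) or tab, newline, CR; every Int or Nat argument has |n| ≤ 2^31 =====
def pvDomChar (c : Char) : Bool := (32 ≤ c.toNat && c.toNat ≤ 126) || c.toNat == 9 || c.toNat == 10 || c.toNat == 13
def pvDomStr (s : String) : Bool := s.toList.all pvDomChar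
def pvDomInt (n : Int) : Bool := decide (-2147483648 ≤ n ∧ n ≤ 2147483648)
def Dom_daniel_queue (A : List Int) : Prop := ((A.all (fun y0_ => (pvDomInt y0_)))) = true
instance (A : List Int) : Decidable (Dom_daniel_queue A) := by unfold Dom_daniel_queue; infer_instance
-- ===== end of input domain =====

-- B replaces A's left-to-right pair-state simulation with a right-to-left suffix
-- recursion on a single scalar (alternative decomposition, same O(n) cost).

-- ===== PORT A =====
-- state = (current_people, min_people)
def daniel_queue_loop (A : List Int) (st : Int × Int) : Int × Int :=
  A.foldl (fun st c =>
    if c == 1 then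
      if st.1 == 0 then (st.1, st.2 + 1) else (st.1 - 1, st.2)
    else (st.1 + 1, st.2)) st

def daniel_queue (A : List Int) : Int := (daniel_queue_loop A (0, 0)).2

-- ===== PORT B =====
-- need(c :: rest) = max(0, w(c) + need(rest)); the reversed-iteration loop in Source B
-- is exactly a right fold over A with accumulator `need`.
def daniel_queue_alt (A : List Int) : Int :=
  A.foldr (fun c need => max 0 ((if c == 1 then 1 else -1) + need)) 0

-- ===== PRECONDITION & SPEC =====
def Spec_daniel_queue (A : List Int) (out : Int) : Prop := out = daniel_queue_alt A
instance (A : List Int) (out : Int) : Decidable (Spec_daniel_queue A out) := by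
  unfold Spec_daniel_queue; infer_instance

-- ===== CLAIM =====
def Claim_equal_daniel_queue : Prop :=
  ∀ (A : List Int), Dom_daniel_queue A → Spec_daniel_queue A (daniel_queue A)

-- ===== LEMMAS AND PROOFS =====

theorem alt_nonneg (l : List Int) : 0 ≤ daniel_queue_alt l := by
  cases l with
  | nil => simp [daniel_queue_alt]
  | cons c l => simp [daniel_queue_alt]

-- Invariant: from state (p, m) with p ≥ 0, A's final min_people is m + max 0 (need(l) - p).
theorem daniel_queue_invariant (l : List Int) (p m : Int) (hp : 0 ≤ p) :
    (daniel_queue_loop l (p, m)).2 = m + max 0 (daniel_queue_alt l - p) := by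
  induction l generalizing p m with
  | nil =>
    simp [daniel_queue_loop, daniel_queue_alt]
    omega
  | cons c l ih =>
    have hl := alt_nonneg l
    simp only [daniel_queue_loop, daniel_queue_alt, List.foldr_cons, List.foldl_cons] at *
    by_cases hc : c = 1
    · by_cases hz : p = 0
      · simp only [hc, hz, beq_self_eq_true, if_pos]
        rw [ih 0 (m + 1) le_rfl]
        omega
      · have e2 : (p == 0) = false := by simpa using hz
        simp only [hc, beq_self_eq_true, ite_true, e2, Bool.false_eq_true, if_false]
        rw [ih (p - 1) m (by omega)]
        omega
    · have hc' : (c == 1) = false := by simpa using hc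
      simp only [hc', Bool.false_eq_true, if_false]
      rw [ih (p + 1) m (by omega)]
      omega

-- ===== VERDICT =====
theorem daniel_queue_spec : Claim_equal_daniel_queue := by
  intro A _
  unfold Spec_daniel_queue daniel_queue
  rw [daniel_queue_invariant A 0 0 le_rfl]
  have := alt_nonneg A
  omega
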